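-- pv_equiv track=rewrite | github.com/vahldiek/reprodb-pipeline | src/generators/committee_stats/classification.py | _aggregate_across_conferences
-- ===== SOURCE A (Python) =====
-- from collections import defaultdict
--
-- def _aggregate_across_conferences(per_conf: dict, conf_to_area: dict):
--     """Aggregate per-conference-year dicts into overall + per-area totals.
--
--     Returns
--     -------
--     (overall, systems, security) — each is {key: total_count}
--     """
--     overall: dict = defaultdict(int)
--     systems: dict = defaultdict(int)
--     security: dict = defaultdict(int)
--     for conf_year, counts in per_conf.items():
--         area = conf_to_area.get(conf_year, "unknown")
--         for key, count in counts.items():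
--             overall[key] += count
--             if area == "systems":
--                 systems[key] += count
--             elif area == "security":
--                 security[key] += count
--     return dict(overall), dict(systems), dict(security)
-- ===== SOURCE B (Python) =====
-- def _aggregate_across_conferences(per_conf: dict, conf_to_area: dict):
--     """Aggregate per-conference-year dicts into overall + per-area totals.
--
--     Group-first decomposition: select each area's conference groups, then
--     total each group with one reusable accumulation helper (three passes,
--     no branching inside the accumulation loop).
--     """
--     def total(counts_list):
--         out = {}
--         for counts in counts_list:
--             for key, count in counts.items():
--                 out[key] = out.get(key, 0) + count
--         return out
--
--     def area_of(conf_year):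
--         return conf_to_area.get(conf_year, "unknown")
--
--     overall = total(per_conf.values())
--     systems = total(c for cy, c in per_conf.items() if area_of(cy) == "systems")
--     security = total(c for cy, c in per_conf.items() if area_of(cy) == "security")
--     return overall, systems, security
-- ===== Notes on version B (the rewrite author's own statement) =====
-- stated objective: simpler
-- what changed: Replaces A's single loop that branches per area into three defaultdict accumulators with a group-first decomposition: partition conference-years by area, then total each group (all / systems / security) with one reusable branch-free accumulation helper.
import Mathlib
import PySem

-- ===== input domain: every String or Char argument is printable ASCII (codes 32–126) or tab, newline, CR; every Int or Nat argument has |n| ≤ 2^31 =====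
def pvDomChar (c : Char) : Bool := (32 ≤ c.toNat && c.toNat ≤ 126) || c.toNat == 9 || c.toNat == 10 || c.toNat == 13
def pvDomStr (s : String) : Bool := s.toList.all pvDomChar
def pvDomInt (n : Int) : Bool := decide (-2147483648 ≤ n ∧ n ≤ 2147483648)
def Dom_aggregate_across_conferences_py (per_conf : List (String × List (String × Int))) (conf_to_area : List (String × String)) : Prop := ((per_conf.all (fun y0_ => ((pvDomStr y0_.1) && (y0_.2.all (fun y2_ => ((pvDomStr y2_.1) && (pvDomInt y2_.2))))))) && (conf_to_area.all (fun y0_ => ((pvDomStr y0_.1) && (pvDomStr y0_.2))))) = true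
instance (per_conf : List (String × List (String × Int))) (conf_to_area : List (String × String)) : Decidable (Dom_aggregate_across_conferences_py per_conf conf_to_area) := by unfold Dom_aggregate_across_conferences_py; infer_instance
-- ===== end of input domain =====

-- B replaces A's single branching loop by a group-first decomposition: select each
-- area's conference groups, then total each group with one reusable helper (objective:
-- simpler — no branching inside the accumulation loop).

-- conf_to_area.get(conf_year, "unknown") — first-match association-list lookup (shared: both Pythons call .get identically)
def pvAreaOf (conf_to_area : List (String × String)) (cy : String) : String :=
  ((conf_to_area.find? (fun p => p.1 == cy)).map (·.2)).getD "unknown"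

-- ===== PORT A =====
def aggregate_across_conferences_py (per_conf : List (String × List (String × Int))) (conf_to_area : List (String × String)) : (List (String × Int)) × (List (String × Int)) × (List (String × Int)) :=
  let r := per_conf.foldl
    (fun (acc : PySem.Dict String Int × PySem.Dict String Int × PySem.Dict String Int) p =>
      let area := pvAreaOf conf_to_area p.1
      p.2.foldl
        (fun acc kc =>
          ( acc.1.modify kc.1 0 (· + kc.2),
            if area == "systems" then acc.2.1.modify kc.1 0 (· + kc.2) else acc.2.1,
            if area == "systems" then acc.2.2
            else if area == "security" then acc.2.2.modify kc.1 0 (· + kc.2)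
            else acc.2.2 ))
        acc)
    (PySem.Dict.empty, PySem.Dict.empty, PySem.Dict.empty)
  (r.1.items, r.2.1.items, r.2.2.items)

-- ===== PORT B =====
-- helper total(counts_list): fresh dict accumulated over the given groups
def pvTotal (groups : List (List (String × Int))) : List (String × Int) :=
  (groups.foldl
    (fun out counts =>
      counts.foldl (fun out kc => out.insert kc.1 (out.getD kc.1 0 + kc.2)) out)
    PySem.Dict.empty).items

def aggregate_across_conferences_py_alt (per_conf : List (String × List (String × Int))) (conf_to_area : List (String × String)) : (List (String × Int)) × (List (String × Int)) × (List (String × Int)) :=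
  ( pvTotal (per_conf.map (·.2)),
    pvTotal ((per_conf.filter (fun p => pvAreaOf conf_to_area p.1 == "systems")).map (·.2)),
    pvTotal ((per_conf.filter (fun p => pvAreaOf conf_to_area p.1 == "security")).map (·.2)) )

-- ===== PRECONDITION & SPEC =====
def Spec_aggregate_across_conferences_py (per_conf : List (String × List (String × Int))) (conf_to_area : List (String × String)) (out : (List (String × Int)) × (List (String × Int)) × (List (String × Int))) : Prop := out = aggregate_across_conferences_py_alt per_conf conf_to_area
instance (per_conf : List (String × List (String × Int))) (conf_to_area : List (String × String)) (out : (List (String × Int)) × (List (String × Int)) × (List (String × Int))) : Decidable (Spec_aggregate_across_conferences_py per_conf conf_to_area out) := by unfold Spec_aggregate_across_conferences_py; infer_instance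

-- ===== CLAIM (what is proved, stated in full; the proofs are below) =====
def Claim_equal_aggregate_across_conferences_py : Prop := ∀ (per_conf : List (String × List (String × Int))) (conf_to_area : List (String × String)), Dom_aggregate_across_conferences_py per_conf conf_to_area → Spec_aggregate_across_conferences_py per_conf conf_to_area (aggregate_across_conferences_py per_conf conf_to_area)

-- ===== LEMMAS AND PROOFS =====

-- B's accumulation step, named for the proofs
def pvIns (d : PySem.Dict String Int) (kc : String × Int) : PySem.Dict String Int :=
  d.insert kc.1 (d.getD kc.1 0 + kc.2)

lemma pvModify_eq_pvIns (d : PySem.Dict String Int) (kc : String × Int) :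
    d.modify kc.1 0 (· + kc.2) = pvIns d kc := PySem.Dict.ext rfl

-- the dict a fold over `groups` builds from start `d`
def pvFoldAll (d : PySem.Dict String Int) (groups : List (List (String × Int))) : PySem.Dict String Int :=
  groups.foldl (fun out counts => counts.foldl pvIns out) d

-- A's inner loop over one conference splits into independent per-component folds
lemma pv_inner (counts : List (String × Int)) (a : String)
    (o s c : PySem.Dict String Int) :
    counts.foldl
      (fun (acc : PySem.Dict String Int × PySem.Dict String Int × PySem.Dict String Int) kc =>
        ( acc.1.modify kc.1 0 (· + kc.2),
          if a == "systems" then acc.2.1.modify kc.1 0 (· + kc.2) else acc.2.1,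
          if a == "systems" then acc.2.2
          else if a == "security" then acc.2.2.modify kc.1 0 (· + kc.2)
          else acc.2.2 )) (o, s, c)
    = ( counts.foldl pvIns o,
        if a == "systems" then counts.foldl pvIns s else s,
        if a == "systems" then c
        else if a == "security" then counts.foldl pvIns c else c ) := by
  induction counts generalizing o s c with
  | nil => simp only [List.foldl]; split_ifs <;> rfl
  | cons kc t ih =>
      simp only [List.foldl_cons]
      rw [ih]
      split_ifs <;> simp [pvModify_eq_pvIns]

-- A's outer loop equals the three group-wise folds of B
lemma pv_outer (conf_to_area : List (String × String))
    (l : List (String × List (String × Int))) (o s c : PySem.Dict String Int) :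
    l.foldl
      (fun (acc : PySem.Dict String Int × PySem.Dict String Int × PySem.Dict String Int) p =>
        let area := pvAreaOf conf_to_area p.1
        p.2.foldl
          (fun acc kc =>
            ( acc.1.modify kc.1 0 (· + kc.2),
              if area == "systems" then acc.2.1.modify kc.1 0 (· + kc.2) else acc.2.1,
              if area == "systems" then acc.2.2
              else if area == "security" then acc.2.2.modify kc.1 0 (· + kc.2)
              else acc.2.2 ))
          acc) (o, s, c)
    = ( pvFoldAll o (l.map (·.2)),
        pvFoldAll s ((l.filter (fun p => pvAreaOf conf_to_area p.1 == "systems")).map (·.2)),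
        pvFoldAll c ((l.filter (fun p => pvAreaOf conf_to_area p.1 == "security")).map (·.2)) ) := by
  induction l generalizing o s c with
  | nil => rfl
  | cons p t ih =>
      simp only [List.foldl, pv_inner, ih, List.map_cons, List.filter_cons]
      by_cases hs : pvAreaOf conf_to_area p.1 = "systems" <;>
        by_cases hc : pvAreaOf conf_to_area p.1 = "security" <;>
        simp_all [pvFoldAll]

-- ===== VERDICT (by name: the statement is the Claim_ definition above) =====
theorem aggregate_across_conferences_py_spec : Claim_equal_aggregate_across_conferences_py := by
  intro per_conf conf_to_area _
  show _ = _
  simp only [aggregate_across_conferences_py, aggregate_across_conferences_py_alt,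
    pvTotal, pv_outer, pvFoldAll]
  rfl
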